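-- pv_equiv track=rewrite | github.com/orsolli/smarthome | tree_parser/parser.py | split_into_trees
-- ===== SOURCE A (Python) =====
-- from typing import List, Dict, Any
--
-- def split_into_trees(input_text: str) -> List[List[str]]:
--     """
--     Split input text into individual tree blocks.
--     """
--     lines = input_text.strip().split('\n')
--
--     trees = []
--     current_block = []
--
--     for line in lines:
--         line = line
--         if not line:
--             continue
--
--         if line.startswith('/'):
--             if current_block:
--                 trees.append(current_block)
--                 current_block = []
--             current_block = [line]
--         else:
--             current_block.append(line)
--
--     if current_block:
--         trees.append(current_block)
--
--     return trees
-- ===== SOURCE B (Python) =====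
-- from typing import List
--
--
-- def _span(ls: List[str]):
--     # longest prefix of non-'/'-lines, plus the rest
--     if ls and not ls[0].startswith('/'):
--         head, rest = _span(ls[1:])
--         return [ls[0]] + head, rest
--     return [], ls
--
--
-- def _group(ls: List[str]) -> List[List[str]]:
--     if not ls:
--         return []
--     body, rest = _span(ls[1:])
--     return [[ls[0]] + body] + _group(rest)
--
--
-- def split_into_trees(input_text: str) -> List[List[str]]:
--     """
--     Split input text into individual tree blocks.
--     """
--     return _group([l for l in input_text.strip().split('\n') if l])
-- ===== Notes on version B (the rewrite author's own statement) =====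
-- stated objective: alternative
-- what changed: Replaces A's single pass with a mutable (trees, current_block) accumulator pair by a recursive decomposition: filter the non-empty lines once, then repeatedly split off one block as head line plus the span of following non-'/'-lines.
import Mathlib
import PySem

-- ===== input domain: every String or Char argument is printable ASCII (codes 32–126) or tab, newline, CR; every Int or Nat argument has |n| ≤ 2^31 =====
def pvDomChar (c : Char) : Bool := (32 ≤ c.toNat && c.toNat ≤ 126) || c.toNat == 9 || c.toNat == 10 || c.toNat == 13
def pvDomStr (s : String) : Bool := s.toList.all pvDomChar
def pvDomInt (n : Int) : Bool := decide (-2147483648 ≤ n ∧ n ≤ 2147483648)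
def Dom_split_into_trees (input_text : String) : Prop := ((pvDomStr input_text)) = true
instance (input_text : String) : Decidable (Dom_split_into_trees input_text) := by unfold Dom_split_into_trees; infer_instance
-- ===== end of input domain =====

-- B replaces A's single accumulator loop (trees, current_block) by a recursive
-- decomposition: filter the non-empty lines once, then repeatedly cut off one block
-- (head line plus the following non-'/'-lines) — objective: alternative structure, same cost.

-- ===== PORT A =====
-- A's trailing 'if current_block: trees.append(current_block)' + return, state = (trees, current_block)
def pvFinish (st : List (List String) × List String) : List (List String) :=
  if st.2 = [] then st.1 else st.1 ++ [st.2]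

-- loop body of A's for-loop, state = (trees, current_block)
def pvStepA (st : List (List String) × List String) (line : String) :
    List (List String) × List String :=
  if line = "" then st
  else if PySem.Str.startswith line "/" then
    (if st.2 = [] then (st.1, [line]) else (st.1 ++ [st.2], [line]))
  else (st.1, st.2 ++ [line])

def split_into_trees (input_text : String) : List (List String) :=
  pvFinish (((PySem.Chars.splitOn (PySem.Chars.strip input_text.toList) ['\n']).map String.ofList).foldl
    pvStepA ([], []))

-- ===== PORT B =====
-- _span: longest prefix of non-'/'-lines, plus the rest
def pvSpan (ls : List String) : List String × List String :=
  match ls with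
  | [] => ([], [])
  | l :: r =>
    if PySem.Str.startswith l "/" = false then
      let p := pvSpan r
      (l :: p.1, p.2)
    else ([], l :: r)

theorem pvSpan_snd_length (ls : List String) : (pvSpan ls).2.length ≤ ls.length := by
  induction ls with
  | nil => simp [pvSpan]
  | cons l r ih =>
    simp only [pvSpan]
    split
    · simpa using Nat.le_succ_of_le ih
    · simp

-- _group: one block (head line + span of its tail), then recurse on the rest
def pvGroup (ls : List String) : List (List String) :=
  match ls with
  | [] => []
  | l :: r => ([l] ++ (pvSpan r).1) :: pvGroup (pvSpan r).2
termination_by ls.length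
decreasing_by
  have h := pvSpan_snd_length r
  simp only [List.length_cons]
  omega

def split_into_trees_alt (input_text : String) : List (List String) :=
  pvGroup (((PySem.Chars.splitOn (PySem.Chars.strip input_text.toList) ['\n']).map String.ofList).filter
    (fun l => decide (l ≠ "")))

-- ===== PRECONDITION & SPEC =====
def Spec_split_into_trees (input_text : String) (out : List (List String)) : Prop := out = split_into_trees_alt input_text
instance (input_text : String) (out : List (List String)) : Decidable (Spec_split_into_trees input_text out) := by unfold Spec_split_into_trees; infer_instance

-- ===== CLAIM (what is proved, stated in full; the proofs are below) =====
def Claim_equal_split_into_trees : Prop := ∀ (input_text : String), Dom_split_into_trees input_text → Spec_split_into_trees input_text (split_into_trees input_text)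

-- ===== LEMMAS AND PROOFS =====

-- A's loop skips empty lines, so folding over the filtered list is the same
theorem pv_foldl_filter (ls : List String) (st : List (List String) × List String) :
    ls.foldl pvStepA st = (ls.filter (fun l => decide (l ≠ ""))).foldl pvStepA st := by
  induction ls generalizing st with
  | nil => rfl
  | cons l r ih =>
    by_cases h : l = ""
    · subst h
      simpa [pvStepA] using ih st
    · simp [h, ih]

-- main invariant: A's accumulator loop over empty-free lines computes B's grouping
theorem pv_main (ls : List String) (hne : ∀ l ∈ ls, l ≠ "")
    (trees : List (List String)) (current : List String) :
    pvFinish (ls.foldl pvStepA (trees, current))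
      = trees ++ (if current = [] then pvGroup ls
          else (current ++ (pvSpan ls).1) :: pvGroup (pvSpan ls).2) := by
  induction ls generalizing trees current with
  | nil =>
    by_cases hc : current = [] <;> simp [pvFinish, pvSpan, pvGroup, hc]
  | cons l r ih =>
    have hl : l ≠ "" := hne l (by simp)
    have hr : ∀ x ∈ r, x ≠ "" := fun x hx => hne x (by simp [hx])
    by_cases hs : PySem.Str.startswith l "/" = true
    · -- '/'-line: close current block (if any), start a new one
      have hspan : pvSpan (l :: r) = ([], l :: r) := by
        simp only [pvSpan, hs]
        simp
      by_cases hc : current = []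
      · subst hc
        have := ih hr trees [l]
        simp only [List.foldl_cons, pvStepA, if_neg hl, hs, if_true] at *
        rw [this]
        simp [pvGroup]
      · have := ih hr (trees ++ [current]) [l]
        simp only [List.foldl_cons, pvStepA, if_neg hl, hs, if_neg hc, if_true] at *
        rw [this]
        simp [pvGroup, hspan]
    · -- ordinary line: append to current block
      have hs' : PySem.Str.startswith l "/" = false := by
        simpa using hs
      have hspan : pvSpan (l :: r) = (l :: (pvSpan r).1, (pvSpan r).2) := by
        simp only [pvSpan, hs']
        simp
      have := ih hr trees (current ++ [l])
      simp only [List.foldl_cons, pvStepA, if_neg hl, hs', Bool.false_eq_true, if_false] at *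
      rw [this]
      by_cases hc : current = []
      · subst hc
        simp [pvGroup]
      · simp [hspan, hc]

-- ===== VERDICT (by name: the statement is the Claim_ definition above) =====
theorem split_into_trees_spec : Claim_equal_split_into_trees := by
  intro input_text _
  unfold Spec_split_into_trees split_into_trees split_into_trees_alt
  conv_lhs => rw [pv_foldl_filter]
  have h := pv_main
    (((PySem.Chars.splitOn (PySem.Chars.strip input_text.toList) ['\n']).map String.ofList).filter (fun l => decide (l ≠ "")))
    (by intro l hl; simpa using (List.of_mem_filter hl)) [] []
  simpa [pvFinish] using h
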